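-- pv_equiv track=rewrite | github.com/caronisaiah/best-fingerings | src/app/services/fingering_engine.py | _template_matches_locked_fingers
-- ===== SOURCE A (Python) =====
-- from typing import Dict, List, Mapping, Optional, Sequence, Tuple
--
-- def _template_matches_locked_fingers(
--     sorted_template: Sequence[int],
--     sorted_local_indices: Sequence[int],
--     locked_by_local_index: Mapping[int, int],
-- ) -> bool:
--     for sorted_pos, local_idx in enumerate(sorted_local_indices):
--         required = locked_by_local_index.get(local_idx)
--         if required is not None and sorted_template[sorted_pos] != required:
--             return False
--     return True
-- ===== SOURCE B (Python) =====
-- def _template_matches_locked_fingers(sorted_template, sorted_local_indices, locked_by_local_index):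
--     positions = {}
--     for pos, idx in enumerate(sorted_local_indices):
--         positions.setdefault(idx, []).append(pos)
--     for local_idx, required in locked_by_local_index.items():
--         for pos in positions.get(local_idx, []):
--             if sorted_template[pos] != required:
--                 return False
--     return True
-- ===== Notes on version B (the rewrite author's own statement) =====
-- stated objective: alternative
-- what changed: A scans every position of sorted_local_indices and does a dict lookup per position; B first groups positions by local index into a dict (one enumerate pass) and then iterates only over the locked constraints, checking each constraint's positions against the template.
-- outside the precondition, e.g. on _template_matches_locked_fingers([1], [2, 3], {2: 5, 3: 7}): A returns False, B returns False; on _template_matches_locked_fingers([1], [2, 3], {3: 9, 2: 9}): A returns False, B raises IndexError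
import Mathlib
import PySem

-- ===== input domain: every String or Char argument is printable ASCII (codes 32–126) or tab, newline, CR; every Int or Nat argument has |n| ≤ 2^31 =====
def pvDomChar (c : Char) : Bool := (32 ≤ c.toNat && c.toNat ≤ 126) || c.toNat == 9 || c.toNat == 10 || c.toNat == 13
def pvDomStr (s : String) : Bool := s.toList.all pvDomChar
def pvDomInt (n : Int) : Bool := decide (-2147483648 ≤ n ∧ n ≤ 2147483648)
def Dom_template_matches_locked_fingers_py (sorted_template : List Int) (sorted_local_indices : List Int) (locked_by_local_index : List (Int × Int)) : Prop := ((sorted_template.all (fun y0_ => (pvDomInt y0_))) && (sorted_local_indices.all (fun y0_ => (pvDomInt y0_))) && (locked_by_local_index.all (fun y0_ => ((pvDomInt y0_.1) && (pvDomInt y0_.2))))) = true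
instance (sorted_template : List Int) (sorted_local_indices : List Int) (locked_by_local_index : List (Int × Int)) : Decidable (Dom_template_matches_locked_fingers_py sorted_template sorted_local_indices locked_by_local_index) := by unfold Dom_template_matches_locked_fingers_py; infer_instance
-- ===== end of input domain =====

-- B groups positions by local index once and then checks only the locked constraints,
-- instead of A's position-by-position scan with a dict lookup per position (objective: alternative decomposition).

-- ===== PORT A =====
-- loop body of A: for (sorted_pos, local_idx) in enumerate(sorted_local_indices)
def pvGoA (t : List Int) (locks : List (Int × Int)) : List (Int × Int) → Bool
  | [] => true
  | (pos, idx) :: rest =>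
    match List.lookup idx locks with      -- locked_by_local_index.get(local_idx): first match in the assoc list
    | none => pvGoA t locks rest
    | some r =>
      match PySem.List.pyGet? t pos with
      | none => false                     -- Python raises IndexError here; excluded by Pre_
      | some v => if v ≠ r then false else pvGoA t locks rest

def template_matches_locked_fingers_py (sorted_template : List Int) (sorted_local_indices : List Int) (locked_by_local_index : List (Int × Int)) : Bool :=
  pvGoA sorted_template locked_by_local_index (PySem.List.enumerate sorted_local_indices 0)

-- ===== PORT B =====
-- positions = {}; for pos, idx in enumerate(...): positions.setdefault(idx, []).append(pos)
def pvBuildPos (sorted_local_indices : List Int) : PySem.Dict Int (List Int) :=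
  (PySem.List.enumerate sorted_local_indices 0).foldl
    (fun d p => d.modify p.2 [] (· ++ [p.1])) PySem.Dict.empty

-- for local_idx, required in locked_by_local_index.items(): for pos in positions.get(local_idx, []): if t[pos] != required: return False
def pvCheckB (t : List Int) (positions : PySem.Dict Int (List Int)) : List (Int × Int) → Bool
  | [] => true
  | (k, r) :: rest =>
    if (positions.getD k []).all (fun p => PySem.List.pyGet? t p == some r)
      -- pyGet? = none is Python's IndexError; excluded by Pre_
    then pvCheckB t positions rest
    else false

def template_matches_locked_fingers_py_alt (sorted_template : List Int) (sorted_local_indices : List Int) (locked_by_local_index : List (Int × Int)) : Bool :=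
  pvCheckB sorted_template (pvBuildPos sorted_local_indices) locked_by_local_index

-- ===== PRECONDITION & SPEC =====
-- Pre_ requires (a) distinct keys in the association list — it stands for a Python dict, whose keys
-- are necessarily distinct, so this excludes no real Python input — and (b) that no locked local
-- index occupies a position at or beyond the end of sorted_template: at such a position the Python
-- programs hit an out-of-range sorted_template[pos] and raise IndexError (A may still return False
-- early on part of such inputs, where B either agrees or itself raises at a later constraint).
def Pre_template_matches_locked_fingers_py (sorted_template : List Int) (sorted_local_indices : List Int) (locked_by_local_index : List (Int × Int)) : Prop :=
  (∀ i ∈ List.range sorted_local_indices.length, sorted_template.length ≤ i →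
      List.lookup sorted_local_indices[i]! locked_by_local_index = none) ∧
  (locked_by_local_index.map Prod.fst).Nodup
instance (sorted_template : List Int) (sorted_local_indices : List Int) (locked_by_local_index : List (Int × Int)) : Decidable (Pre_template_matches_locked_fingers_py sorted_template sorted_local_indices locked_by_local_index) := by unfold Pre_template_matches_locked_fingers_py; infer_instance

def pvWitness_template_matches_locked_fingers_py : List Int × List Int × (List (Int × Int)) := ([1, 2, 3], [10, 11], [(11, 2), (5, 9)])

def Spec_template_matches_locked_fingers_py (sorted_template : List Int) (sorted_local_indices : List Int) (locked_by_local_index : List (Int × Int)) (out : Bool) : Prop := out = template_matches_locked_fingers_py_alt sorted_template sorted_local_indices locked_by_local_index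
instance (sorted_template : List Int) (sorted_local_indices : List Int) (locked_by_local_index : List (Int × Int)) (out : Bool) : Decidable (Spec_template_matches_locked_fingers_py sorted_template sorted_local_indices locked_by_local_index out) := by unfold Spec_template_matches_locked_fingers_py; infer_instance

-- ===== CLAIM (what is proved, stated in full; the proofs are below) =====
def Claim_equal_template_matches_locked_fingers_py : Prop := ∀ (sorted_template : List Int) (sorted_local_indices : List Int) (locked_by_local_index : List (Int × Int)), Dom_template_matches_locked_fingers_py sorted_template sorted_local_indices locked_by_local_index → Pre_template_matches_locked_fingers_py sorted_template sorted_local_indices locked_by_local_index → Spec_template_matches_locked_fingers_py sorted_template sorted_local_indices locked_by_local_index (template_matches_locked_fingers_py sorted_template sorted_local_indices locked_by_local_index)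

-- ===== LEMMAS AND PROOFS =====

theorem pvGoA_eq_true_iff (t : List Int) (locks : List (Int × Int)) (l : List (Int × Int)) :
    pvGoA t locks l = true ↔
      ∀ q ∈ l, ∀ r, List.lookup q.2 locks = some r → PySem.List.pyGet? t q.1 = some r := by
  induction l with
  | nil => simp [pvGoA]
  | cons hd tl ih =>
    obtain ⟨pos, idx⟩ := hd
    simp only [pvGoA]
    cases hlk : List.lookup idx locks with
    | none =>
      dsimp only
      rw [ih]
      constructor
      · intro h q hq r hr
        rcases List.mem_cons.mp hq with rfl | hq'
        · simp [hlk] at hr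
        · exact h q hq' r hr
      · intro h q hq r hr
        exact h q (List.mem_cons_of_mem _ hq) r hr
    | some r0 =>
      dsimp only
      cases hget : PySem.List.pyGet? t pos with
      | none =>
        dsimp only
        constructor
        · intro h; cases h
        · intro h
          have h2 := h (pos, idx) (by simp) r0 (by simpa using hlk)
          simp only at h2
          rw [hget] at h2; cases h2
      | some v =>
        dsimp only
        by_cases hv : v = r0
        · subst hv
          rw [if_neg (by simp), ih]
          constructor
          · intro h q hq r hr
            rcases List.mem_cons.mp hq with rfl | hq'
            · simp [hlk] at hr
              simp [hget, hr]
            · exact h q hq' r hr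
          · intro h q hq r hr
            exact h q (List.mem_cons_of_mem _ hq) r hr
        · rw [if_pos hv]
          constructor
          · intro h; cases h
          · intro h
            have h2 := h (pos, idx) (by simp) r0 (by simpa using hlk)
            simp only at h2
            rw [hget] at h2
            exact (hv (Option.some.inj h2)).elim

theorem pvCheckB_eq_true_iff (t : List Int) (d : PySem.Dict Int (List Int)) (l : List (Int × Int)) :
    pvCheckB t d l = true ↔
      ∀ q ∈ l, ∀ p ∈ d.getD q.1 [], PySem.List.pyGet? t p = some q.2 := by
  induction l with
  | nil => simp [pvCheckB]
  | cons hd tl ih =>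
    obtain ⟨k, r⟩ := hd
    simp only [pvCheckB]
    by_cases hall : (d.getD k []).all (fun p => PySem.List.pyGet? t p == some r) = true
    · rw [if_pos hall, ih]
      rw [List.all_eq_true] at hall
      constructor
      · intro h q hq p hp
        rcases List.mem_cons.mp hq with rfl | hq'
        · simpa using hall p hp
        · exact h q hq' p hp
      · intro h q hq p hp
        exact h q (List.mem_cons_of_mem _ hq) p hp
    · rw [if_neg hall]
      constructor
      · intro h; cases h
      · intro h
        exfalso
        apply hall
        rw [List.all_eq_true]
        intro p hp
        simpa using h (k, r) (by simp) p hp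

theorem lookup_eq_some_of_mem {l : List (Int × Int)} {k r : Int}
    (hnd : (l.map Prod.fst).Nodup) (hm : (k, r) ∈ l) : List.lookup k l = some r := by
  induction l with
  | nil => simp at hm
  | cons hd tl ih =>
    obtain ⟨a, b⟩ := hd
    simp only [List.map_cons, List.nodup_cons] at hnd
    rcases List.mem_cons.mp hm with h | h
    · obtain ⟨rfl, rfl⟩ := Prod.mk.injEq .. ▸ h
      simp [List.lookup]
    · have hka : (k == a) = false := by
        simp only [beq_eq_false_iff_ne, ne_eq]
        rintro rfl
        exact hnd.1 (List.mem_map.mpr ⟨(k, r), h, rfl⟩)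
      simp only [List.lookup, hka]
      exact ih hnd.2 h

theorem mem_of_lookup_eq_some {l : List (Int × Int)} {k r : Int}
    (h : List.lookup k l = some r) : (k, r) ∈ l := by
  induction l with
  | nil => simp [List.lookup] at h
  | cons hd tl ih =>
    obtain ⟨a, b⟩ := hd
    by_cases hka : (k == a) = true
    · simp only [List.lookup, hka] at h
      have : b = r := Option.some.inj h
      subst this
      simp [show k = a from by simpa using hka]
    · have hka' : (k == a) = false := by simp_all
      simp only [List.lookup, hka'] at h
      exact List.mem_cons_of_mem _ (ih h)

-- the grouped positions dict: p is stored under key k iff (p, k) is an enumerated pair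
theorem mem_pvBuildPos (ls : List Int) (k : Int) (p : Int) :
    p ∈ (pvBuildPos ls).getD k [] ↔ (p, k) ∈ PySem.List.enumerate ls 0 := by
  unfold pvBuildPos
  have hmap : (PySem.List.enumerate ls 0).foldl (fun d p => d.modify p.2 [] (· ++ [p.1])) PySem.Dict.empty
      = ((PySem.List.enumerate ls 0).map (fun p => (p.2, p.1))).foldl
          (fun d q => d.modify q.1 [] (· ++ [q.2])) PySem.Dict.empty := by
    rw [List.foldl_map]
  rw [hmap, PySem.Dict.getD_foldl_modify_append, PySem.Dict.getD_empty]
  simp only [List.nil_append, List.filter_map, List.map_map, List.mem_map, List.mem_filter,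
    Function.comp]
  constructor
  · rintro ⟨⟨a, b⟩, ⟨hmem, hk⟩, rfl⟩
    have hb : b = k := by simpa using hk
    subst hb
    exact hmem
  · intro h
    exact ⟨(p, k), ⟨h, by simp⟩, rfl⟩

-- ===== VERDICT (by name: the statement is the Claim_ definition above) =====
theorem template_matches_locked_fingers_py_spec : Claim_equal_template_matches_locked_fingers_py := by
  intro t ls locks _ hpre
  unfold Spec_template_matches_locked_fingers_py
  unfold template_matches_locked_fingers_py template_matches_locked_fingers_py_alt
  rw [Bool.eq_iff_iff, pvGoA_eq_true_iff, pvCheckB_eq_true_iff]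
  constructor
  · rintro h ⟨k, r⟩ hkr p hp
    rw [mem_pvBuildPos] at hp
    exact h (p, k) hp r (lookup_eq_some_of_mem hpre.2 hkr)
  · rintro h ⟨p, i⟩ hpi r hlk
    exact h (i, r) (mem_of_lookup_eq_some hlk) p ((mem_pvBuildPos ls i p).mpr hpi)
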